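-- pv_equiv track=rewrite | github.com/matthewelse/british-informatics-olympiad | 2011/q3.py | nth_with_n_digits
-- ===== SOURCE A (Python) =====
-- def nth_with_n_digits(number_of_digits, n):
-- 	if number_of_digits == 0:
-- 		return ""
-- 	if number_of_digits % 2 == 1:
-- 		even = nth_with_n_digits(number_of_digits - 1, n)
-- 		middle = len(even)//2
-- 		return even[:middle] + "5" + even[middle:]
--
-- 	# 9**(n / 2)
-- 	output = ""
-- 	# it needs to start at 0
-- 	n -= 1
-- 	for i in range(number_of_digits // 2):
-- 		n, inner = divmod(n, 9)
-- 		inner += 1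
-- 		#n += 1
-- 		output = str(inner) + output + str(10-inner)
--
-- 	return output
-- ===== SOURCE B (Python) =====
-- def _to_base9(t, k):
--     # the k base-9 digits of t (0 <= t < 9**k), most significant first,
--     # by divide-and-conquer halving instead of a sequential divmod chain
--     if k == 0:
--         return []
--     if k == 1:
--         return [t]
--     h = k // 2
--     hi, lo = divmod(t, 9 ** (k - h))
--     return _to_base9(hi, h) + _to_base9(lo, k - h)
--
-- def nth_with_n_digits(number_of_digits, n):
--     if number_of_digits == 0:
--         return ""
--     half = number_of_digits // 2
--     if half > 0:
--         # one modular reduction replaces the floor-divmod chain (also for negative n)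
--         digs = _to_base9((n - 1) % 9 ** half, half)
--     else:
--         digs = []
--     left = ''.join(str(d + 1) for d in digs)
--     right = ''.join(str(9 - d) for d in reversed(digs))
--     return left + ('5' if number_of_digits % 2 == 1 else '') + right
-- ===== Notes on version B (the rewrite author's own statement) =====
-- stated objective: faster
-- what changed: Replaces A's stateful loop (a running n updated by divmod each step, the output string rebuilt around the accumulator, plus a recursive odd-case wrapper that slices the even string to splice in '5') by one modular reduction m = (n-1) % 9**half followed by divide-and-conquer radix conversion to the base-9 digit list, from which the two halves are built as separate joins with the middle '5' placed directly.
import Mathlib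
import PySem

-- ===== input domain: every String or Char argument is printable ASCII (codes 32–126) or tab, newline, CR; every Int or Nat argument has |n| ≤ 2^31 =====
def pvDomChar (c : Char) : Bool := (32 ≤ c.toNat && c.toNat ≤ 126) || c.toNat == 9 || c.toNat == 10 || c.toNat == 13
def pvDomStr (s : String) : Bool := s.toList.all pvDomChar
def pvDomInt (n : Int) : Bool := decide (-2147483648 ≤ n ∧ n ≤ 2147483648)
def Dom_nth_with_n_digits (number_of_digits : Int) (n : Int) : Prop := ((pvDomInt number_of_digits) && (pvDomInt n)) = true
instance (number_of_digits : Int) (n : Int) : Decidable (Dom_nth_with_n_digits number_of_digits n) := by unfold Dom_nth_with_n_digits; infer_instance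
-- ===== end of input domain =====

-- B: one modular reduction (n-1) % 9**half followed by divide-and-conquer radix conversion to the
-- base-9 digit list, then two joins around the directly-placed middle '5' — no running divmod chain,
-- no per-step string rebuild, no odd-case recursion-and-slice; objective: faster (measured).


-- ===== PORT A =====
def nth_with_n_digits (number_of_digits : Int) (n : Int) : String :=
  if number_of_digits == 0 then ""
  else if h : PySem.Int.mod number_of_digits 2 == 1 then
    let even := nth_with_n_digits (number_of_digits - 1) n
    let middle := PySem.Int.floordiv (PySem.Str.len even) 2
    PySem.Str.slice even none (some middle) ++ "5" ++ PySem.Str.slice even (some middle) none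
  else
    ((PySem.List.pyRange 0 (PySem.Int.floordiv number_of_digits 2) 1).foldl
      (fun (st : Int × String) _ =>
        (PySem.Int.floordiv st.1 9,
          PySem.Int.toStr (PySem.Int.mod st.1 9 + 1) ++ st.2 ++ PySem.Int.toStr (10 - (PySem.Int.mod st.1 9 + 1))))
      (n - 1, "")).2
termination_by (PySem.Int.mod number_of_digits 2).toNat
decreasing_by
  rw [PySem.Int.mod_eq_emod_of_pos (by norm_num : (0:Int) < 2)] at h ⊢
  rw [PySem.Int.mod_eq_emod_of_pos (by norm_num : (0:Int) < 2)]
  simp only [beq_iff_eq] at h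
  omega

-- ===== PORT B =====
def pvToBase9 (t : Int) (k : Nat) : List Int :=
  if k = 0 then []
  else if k = 1 then [t]
  else
    pvToBase9 (PySem.Int.floordiv t ((9:Int) ^ (k - k / 2))) (k / 2) ++
    pvToBase9 (PySem.Int.mod t ((9:Int) ^ (k - k / 2))) (k - k / 2)
termination_by k
decreasing_by all_goals omega

def nth_with_n_digits_alt (number_of_digits : Int) (n : Int) : String :=
  if number_of_digits == 0 then ""
  else
    let half := PySem.Int.floordiv number_of_digits 2
    -- 9 ** half: half > 0 on this branch, so .toNat is exact
    let digs := if half > 0 then pvToBase9 (PySem.Int.mod (n - 1) ((9:Int) ^ half.toNat)) half.toNat else []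
    let left := PySem.Str.join "" (digs.map (fun d => PySem.Int.toStr (d + 1)))
    let right := PySem.Str.join "" (digs.reverse.map (fun d => PySem.Int.toStr (9 - d)))
    left ++ (if PySem.Int.mod number_of_digits 2 == 1 then "5" else "") ++ right

-- ===== PRECONDITION & SPEC =====
def Spec_nth_with_n_digits (number_of_digits : Int) (n : Int) (out : String) : Prop := out = nth_with_n_digits_alt number_of_digits n
instance (number_of_digits : Int) (n : Int) (out : String) : Decidable (Spec_nth_with_n_digits number_of_digits n out) := by unfold Spec_nth_with_n_digits; infer_instance

-- ===== CLAIM (what is proved, stated in full; the proofs are below) =====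
def Claim_equal_nth_with_n_digits : Prop := ∀ (number_of_digits : Int) (n : Int), Dom_nth_with_n_digits number_of_digits n → Spec_nth_with_n_digits number_of_digits n (nth_with_n_digits number_of_digits n)

-- ===== LEMMAS AND PROOFS =====

/-- the digits (each in 1..9) extracted by k divmod steps starting from n -/
def pvI : Nat → Int → List Int
  | 0, _ => []
  | k+1, n => (PySem.Int.mod n 9 + 1) :: pvI k (PySem.Int.floordiv n 9)

def pvL (k : Nat) (n : Int) : List Char := ((pvI k n).reverse.map PySem.Int.toChars).flatten
def pvR (k : Nat) (n : Int) : List Char := ((pvI k n).map (fun x => PySem.Int.toChars (10 - x))).flatten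

lemma pv_join_toList (l : List (List Char)) : PySem.Chars.join [] l = l.flatten := by
  show List.intercalate [] l = l.flatten
  simp [List.intercalate]
  induction l with
  | nil => simp
  | cons a t ih => cases t <;> simp_all [List.intersperse]

lemma pvI_mem_bounds : ∀ (k : Nat) (n : Int), ∀ x ∈ pvI k n, 1 ≤ x ∧ x ≤ 9 := by
  intro k
  induction k with
  | zero => intro n x hx; simp [pvI] at hx
  | succ k ih =>
    intro n x hx
    simp only [pvI, List.mem_cons] at hx
    rcases hx with h | h
    · subst h
      rw [PySem.Int.mod_eq_emod_of_pos (by norm_num : (0:Int) < 9)]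
      have h1 := Int.emod_nonneg n (by norm_num : (9:Int) ≠ 0)
      have h2 := Int.emod_lt_of_pos n (by norm_num : (0:Int) < 9)
      omega
    · exact ih _ x h

lemma pv_digit_len (d : Int) (h1 : 1 ≤ d) (h2 : d ≤ 9) : (PySem.Int.toChars d).length = 1 := by
  interval_cases d <;> decide

lemma pvI_length (k : Nat) : ∀ n, (pvI k n).length = k := by
  induction k with
  | zero => intro n; simp [pvI]
  | succ k ih => intro n; simp [pvI, ih]

/-- closed form for the i-th divmod-extracted digit: one floor division by 9^i -/
lemma pvI_getElem : ∀ (k : Nat) (m : Int) (i : Nat) (h : i < k),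
    (pvI k m)[i]'(by rw [pvI_length]; exact h)
    = (m / (9:Int) ^ i) % 9 + 1 := by
  intro k
  induction k with
  | zero => intro m i h; omega
  | succ k ih =>
    intro m i h
    cases i with
    | zero =>
      simp [pvI]
    | succ i =>
      have := ih (PySem.Int.floordiv m 9) i (by omega)
      simp only [pvI, List.getElem_cons_succ]
      rw [this]
      congr 2
      rw [PySem.Int.floordiv_eq_ediv_of_pos (by norm_num : (0:Int) < 9),
          Int.ediv_ediv_of_nonneg (by norm_num : (0:Int) ≤ 9), pow_succ']

/-- digits below the window survive taking m mod 9^r -/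
lemma pvD_emod (m : Int) (r i : Nat) (h : i < r) :
    ((m % (9:Int) ^ r) / (9:Int) ^ i) % 9 = (m / (9:Int) ^ i) % 9 := by
  conv_rhs => rw [← Int.emod_add_mul_ediv m ((9:Int) ^ r)]
  have hr : (9:Int) ^ r = (9:Int) ^ i * ((9:Int) ^ (r - i - 1) * 9) := by
    rw [← pow_succ, ← pow_add]; congr 1; omega
  rw [hr, mul_assoc ((9:Int) ^ i), Int.add_mul_ediv_left _ _ (by positivity : ((9:Int) ^ i) ≠ 0)]
  rw [show (9:Int) ^ (r - i - 1) * 9 * (m / ((9:Int) ^ i * ((9:Int) ^ (r - i - 1) * 9)))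
        = 9 * (m / ((9:Int) ^ i * ((9:Int) ^ (r - i - 1) * 9)) * (9:Int) ^ (r - i - 1)) from by ring,
      Int.add_mul_emod_self_left]

lemma pv_flatten_len : ∀ (l : List (List Char)), (∀ x ∈ l, x.length = 1) → l.flatten.length = l.length := by
  intro l
  induction l with
  | nil => simp
  | cons a t iht =>
    intro h
    simp only [List.flatten_cons, List.length_append, List.length_cons,
      h a (by simp), iht (fun x hx => h x (by simp [hx]))]
    omega

lemma pvL_length (k : Nat) (n : Int) : (pvL k n).length = k := by
  rw [pvL, pv_flatten_len]
  · simp [pvI_length]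
  · intro x hx
    simp only [List.mem_map, List.mem_reverse] at hx
    obtain ⟨d, hd, rfl⟩ := hx
    obtain ⟨h1, h2⟩ := pvI_mem_bounds k n d hd
    exact pv_digit_len d h1 h2

lemma pvR_length (k : Nat) (n : Int) : (pvR k n).length = k := by
  rw [pvR, pv_flatten_len]
  · simp [pvI_length]
  · intro x hx
    simp only [List.mem_map] at hx
    obtain ⟨d, hd, rfl⟩ := hx
    obtain ⟨h1, h2⟩ := pvI_mem_bounds k n d hd
    exact pv_digit_len _ (by omega) (by omega)

/-- A's loop produces pvL ++ out ++ pvR -/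
lemma pv_foldA (l : List Int) : ∀ (n : Int) (out : String),
    ((l.foldl (fun (st : Int × String) _ =>
        (PySem.Int.floordiv st.1 9,
          PySem.Int.toStr (PySem.Int.mod st.1 9 + 1) ++ st.2 ++ PySem.Int.toStr (10 - (PySem.Int.mod st.1 9 + 1)))) (n, out)).2).toList
    = pvL l.length n ++ out.toList ++ pvR l.length n := by
  induction l with
  | nil => intro n out; simp [pvL, pvR, pvI]
  | cons a t ih =>
    intro n out
    simp only [List.foldl_cons, List.length_cons]
    rw [ih]
    simp [pvL, pvR, pvI, PySem.Int.toList_toStr, List.append_assoc]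

lemma pv_A_even (nd n : Int) (h : PySem.Int.mod nd 2 = 0) :
    (nth_with_n_digits nd n).toList
    = pvL (PySem.Int.floordiv nd 2).toNat (n - 1) ++ pvR (PySem.Int.floordiv nd 2).toNat (n - 1) := by
  rw [nth_with_n_digits]
  by_cases h0 : nd = 0
  · subst h0
    simp [pvL, pvR, pvI, PySem.Int.floordiv]
  · rw [if_neg (by simpa using h0), dif_neg (by rw [h]; decide)]
    rw [pv_foldA]
    have he : "".toList = ([] : List Char) := by decide
    simp [PySem.List.length_pyRange_one, he]

/-- divide-and-conquer radix conversion returns the base-9 digits, most significant first -/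
lemma pvToBase9_eq : ∀ (k : Nat) (t : Int), 0 ≤ t → t < (9:Int) ^ k →
    pvToBase9 t k = (List.range k).map (fun j => (t / (9:Int) ^ (k - 1 - j)) % 9) := by
  intro k
  induction k using Nat.strongRecOn with
  | _ k ih =>
    intro t ht0 ht1
    rw [pvToBase9]
    by_cases hk0 : k = 0
    · subst hk0; simp
    rw [if_neg hk0]
    by_cases hk1 : k = 1
    · subst hk1
      rw [if_pos rfl]
      have : t % 9 = t := Int.emod_eq_of_lt ht0 (by simpa using ht1)
      simp [this]
    rw [if_neg hk1]
    have hk2 : 2 ≤ k := by omega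
    set h := k / 2 with hh
    have hpos : (0:Int) < (9:Int) ^ (k - h) := by positivity
    have hfd : PySem.Int.floordiv t ((9:Int) ^ (k - h)) = t / (9:Int) ^ (k - h) :=
      PySem.Int.floordiv_eq_ediv_of_pos hpos
    have hmd : PySem.Int.mod t ((9:Int) ^ (k - h)) = t % (9:Int) ^ (k - h) :=
      PySem.Int.mod_eq_emod_of_pos hpos
    have hsplit : (9:Int) ^ h * (9:Int) ^ (k - h) = (9:Int) ^ k := by
      rw [← pow_add]; congr 1; omega
    have hhi0 : 0 ≤ t / (9:Int) ^ (k - h) := Int.ediv_nonneg ht0 (le_of_lt hpos)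
    have hhi1 : t / (9:Int) ^ (k - h) < (9:Int) ^ h := by
      rw [Int.ediv_lt_iff_lt_mul hpos, hsplit]; exact ht1
    have hlo0 : 0 ≤ t % (9:Int) ^ (k - h) := Int.emod_nonneg t (by positivity)
    have hlo1 : t % (9:Int) ^ (k - h) < (9:Int) ^ (k - h) := Int.emod_lt_of_pos t hpos
    rw [hfd, hmd, ih h (by omega) _ hhi0 hhi1, ih (k - h) (by omega) _ hlo0 hlo1]
    have hkdec : k = h + (k - h) := by omega
    conv_rhs => rw [hkdec, List.range_add, List.map_append, List.map_map]
    congr 1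
    · apply List.map_congr_left
      intro j hj
      rw [List.mem_range] at hj
      rw [Int.ediv_ediv_of_nonneg (le_of_lt hpos), ← pow_add]
      congr 3
      omega
    · apply List.map_congr_left
      intro j hj
      rw [List.mem_range] at hj
      simp only [Function.comp]
      rw [pvD_emod t (k - h) ((k - h) - 1 - j) (by omega)]
      congr 3
      omega

lemma pv_B_toList (nd n : Int) (h0 : nd ≠ 0) :
    (nth_with_n_digits_alt nd n).toList
    = pvL (PySem.Int.floordiv nd 2).toNat (n - 1)
      ++ (if PySem.Int.mod nd 2 = 1 then ['5'] else [])
      ++ pvR (PySem.Int.floordiv nd 2).toNat (n - 1) := by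
  rw [nth_with_n_digits_alt]
  simp only [beq_iff_eq, h0, if_false]
  set half := PySem.Int.floordiv nd 2 with hhalf
  set k := half.toNat with hk
  set m := n - 1 with hm
  have hdigs : (if half > 0 then pvToBase9 (PySem.Int.mod m ((9:Int) ^ k)) k else [])
      = (List.range k).map (fun j => (m / (9:Int) ^ (k - 1 - j)) % 9) := by
    by_cases hp : half > 0
    · rw [if_pos hp]
      have hpos : (0:Int) < (9:Int) ^ k := by positivity
      have hmd : PySem.Int.mod m ((9:Int) ^ k) = m % (9:Int) ^ k :=
        PySem.Int.mod_eq_emod_of_pos hpos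
      rw [hmd, pvToBase9_eq k _ (Int.emod_nonneg m (by positivity)) (Int.emod_lt_of_pos m hpos)]
      apply List.map_congr_left
      intro j hj
      rw [List.mem_range] at hj
      exact pvD_emod m k (k - 1 - j) (by omega)
    · rw [if_neg hp]
      have : k = 0 := by omega
      rw [this]
      simp
  have hlenI : (pvI k m).length = k := pvI_length k m
  have hL : ((if half > 0 then pvToBase9 (PySem.Int.mod m ((9:Int) ^ k)) k else []).map
        (fun d => PySem.Int.toChars (d + 1)))
      = (pvI k m).reverse.map PySem.Int.toChars := by
    rw [hdigs, List.map_map]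
    apply List.ext_getElem
    · simp [hlenI]
    · intro j hj1 hj2
      simp only [List.length_map, List.length_range] at hj1
      simp only [List.getElem_map, List.getElem_range, List.getElem_reverse, Function.comp,
        hlenI]
      have hx : k - 1 - j < k := by omega
      rw [pvI_getElem k m _ hx]
  have hR : (((if half > 0 then pvToBase9 (PySem.Int.mod m ((9:Int) ^ k)) k else []).reverse).map
        (fun d => PySem.Int.toChars (9 - d)))
      = (pvI k m).map (fun x => PySem.Int.toChars (10 - x)) := by
    rw [hdigs]
    apply List.ext_getElem
    · simp [hlenI]
    · intro j hj1 hj2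
      simp only [List.length_reverse, List.length_map, List.length_range] at hj1
      simp only [List.getElem_map, List.getElem_reverse, List.length_map, List.length_range,
        List.getElem_range]
      rw [pvI_getElem k m j (by omega)]
      have hidx : k - 1 - (k - 1 - j) = j := by omega
      rw [hidx]
      congr 1
      ring
  simp only [String.toList_append, PySem.Str.toList_join]
  have he : "".toList = ([] : List Char) := by decide
  rw [he, pv_join_toList, pv_join_toList, List.map_map, List.map_map]
  have hcomp : ∀ (g : Int → Int) (l : List Int),
      l.map (String.toList ∘ fun d => PySem.Int.toStr (g d)) = l.map (fun d => PySem.Int.toChars (g d)) := by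
    intro g l
    apply List.map_congr_left
    intro d _
    simp [Function.comp, PySem.Int.toList_toStr]
  rw [show (String.toList ∘ fun d => PySem.Int.toStr (d + 1))
        = (fun (d : Int) => PySem.Int.toChars (d + 1)) from by funext d; simp [PySem.Int.toList_toStr],
      show (String.toList ∘ fun d => PySem.Int.toStr (9 - d))
        = (fun (d : Int) => PySem.Int.toChars (9 - d)) from by funext d; simp [PySem.Int.toList_toStr]]
  rw [hL, hR, pvL, pvR]
  split_ifs <;> rfl

-- ===== VERDICT (by name: the statement is the Claim_ definition above) =====
theorem nth_with_n_digits_spec : Claim_equal_nth_with_n_digits := by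
  unfold Claim_equal_nth_with_n_digits
  intro nd n _
  unfold Spec_nth_with_n_digits
  apply String.toList_inj.mp
  by_cases h0 : nd = 0
  · subst h0; rw [nth_with_n_digits, nth_with_n_digits_alt]; simp
  rcases PySem.Int.mod_two_eq nd with heven | hodd
  · rw [pv_A_even nd n heven, pv_B_toList nd n h0]
    rw [if_neg (by rw [heven]; decide)]
    simp
  · -- odd case
    have hne : PySem.Int.mod (nd - 1) 2 = 0 := by
      rw [PySem.Int.mod_eq_emod_of_pos (by norm_num : (0:Int) < 2)] at hodd ⊢
      omega
    have hdiv : PySem.Int.floordiv (nd - 1) 2 = PySem.Int.floordiv nd 2 := by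
      rw [PySem.Int.floordiv_eq_ediv_of_pos (by norm_num : (0:Int) < 2),
          PySem.Int.floordiv_eq_ediv_of_pos (by norm_num : (0:Int) < 2)]
      rw [PySem.Int.mod_eq_emod_of_pos (by norm_num : (0:Int) < 2)] at hodd
      omega
    set k := (PySem.Int.floordiv nd 2).toNat with hk
    have hA1 : (nth_with_n_digits (nd - 1) n).toList = pvL k (n - 1) ++ pvR k (n - 1) := by
      rw [pv_A_even (nd - 1) n hne, hdiv]
    rw [nth_with_n_digits]
    rw [if_neg (by simpa using h0), dif_pos (by rw [hodd]; decide)]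
    rw [pv_B_toList nd n h0, if_pos hodd]
    have hlen : (nth_with_n_digits (nd - 1) n).toList.length = 2 * k := by
      rw [hA1]; simp [pvL_length, pvR_length]; omega
    have hmid : PySem.Int.floordiv (PySem.Str.len (nth_with_n_digits (nd - 1) n)) 2 = (k : Int) := by
      rw [PySem.Str.len_eq, hlen, PySem.Int.floordiv_eq_ediv_of_pos (by norm_num : (0:Int) < 2)]
      omega
    rw [String.toList_append, String.toList_append, PySem.Str.toList_slice, PySem.Str.toList_slice,
        PySem.Chars.slice_eq_listSlice, PySem.Chars.slice_eq_listSlice, hmid,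
        PySem.List.slice_to _ (Int.natCast_nonneg k), PySem.List.slice_from _ (Int.natCast_nonneg k), hA1]
    have htake : (pvL k (n-1) ++ pvR k (n-1)).take ((k:Int)).toNat = pvL k (n-1) := by
      rw [Int.toNat_natCast]
      have h := List.take_left (l₁ := pvL k (n-1)) (l₂ := pvR k (n-1))
      rwa [pvL_length] at h
    have hdrop : (pvL k (n-1) ++ pvR k (n-1)).drop ((k:Int)).toNat = pvR k (n-1) := by
      rw [Int.toNat_natCast]
      have h := List.drop_left (l₁ := pvL k (n-1)) (l₂ := pvR k (n-1))
      rwa [pvL_length] at h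
    rw [htake, hdrop]
    have h5 : "5".toList = ['5'] := by decide
    rw [h5]
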